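-- pv_equiv track=rewrite | github.com/201411096/study_algorithm | baekjoon/2775.py | solution
-- ===== SOURCE A (Python) =====
-- def solution(k, n):
--     result = None
--
--     # 계산 편의상 열도 하나씩 추가해둠
--     arr = [[0 for c in range(n+1)] for r in range(k+1)]
--
--     for i in range(k+1):
--         for j in range(n+1):
--             if j==0:
--                 arr[i][j] = 0
--             elif i == 0:
--                 arr[i][j] = j
--             else:
--                 # 아래(a-1)층의 1호부터 b호에 사는 사람 수는 ...
--                 # 바로 아래층, 같은 호에 사는 사람수(a-1층의 b호)과 같은층, 옆에 호 사는 사람(a층의 b-1호)수를 더한 것과 같음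
--                 # ㄴ a층의 b-1호 사는 사람의 수가 a-1층의 1호부터 b-1호 까지 사는 사람 수의 합이기 때문
--                 arr[i][j] = arr[i-1][j] + arr[i][j-1]
--
--     result = arr[k][n]
--
--
--     return result
-- ===== SOURCE B (Python) =====
-- def solution(k, n):
--     # residents on floor k, apartment n = C(n + k, k + 1), computed as a
--     # falling-product binomial over r = min(k + 1, n - 1) factors
--     r = min(k + 1, n - 1)
--     if r < 0:
--         return 0
--     c = 1
--     for i in range(1, r + 1):
--         c = c * (n + k - r + i) // i
--     return c
-- ===== Notes on version B (the rewrite author's own statement) =====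
-- stated objective: faster
-- what changed: Replaces the (k+1)x(n+1) dynamic-programming table with the closed form C(n+k, k+1), evaluated as an exact falling-factorial product over min(k+1, n-1) factors.
-- outside the precondition, e.g. on solution(2, -1): A raises IndexError, B returns 0; on solution(-1, 3): A raises IndexError, B returns 1
import Mathlib
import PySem

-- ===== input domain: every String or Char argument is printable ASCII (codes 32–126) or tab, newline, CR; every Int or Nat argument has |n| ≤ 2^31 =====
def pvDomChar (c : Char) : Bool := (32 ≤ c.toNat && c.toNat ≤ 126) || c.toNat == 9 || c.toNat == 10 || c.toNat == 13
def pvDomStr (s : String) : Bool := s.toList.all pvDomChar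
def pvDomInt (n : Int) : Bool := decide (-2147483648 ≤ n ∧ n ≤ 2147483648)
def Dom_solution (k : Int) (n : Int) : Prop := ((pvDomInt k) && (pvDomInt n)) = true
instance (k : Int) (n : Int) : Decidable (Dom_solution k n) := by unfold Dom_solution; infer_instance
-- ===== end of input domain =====

-- B replaces A's O(k*n) DP table with the closed form C(n+k, k+1), computed as an
-- exact falling-factorial product over min(k+1, n-1) factors (objective: faster).

-- ===== PORT A =====
-- one assignment arr[i][j] = … of A's inner loop (reads arr[i-1][j], arr[i][j-1], writes arr[i][j]);
-- Python lists are arrays, so the table is an Array of Arrays; all indices the loop produces are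
-- in range and nonnegative, so getD/setIfInBounds/modify are exact here
def aStep (i : Int) (arr : Array (Array Int)) (j : Int) : Array (Array Int) :=
  let v : Int :=
    if j = 0 then 0
    else if i = 0 then j
    else (arr.getD (i-1).toNat #[]).getD j.toNat 0 +
         (arr.getD i.toNat #[]).getD (j-1).toNat 0
  arr.modify i.toNat (fun row => row.setIfInBounds j.toNat v)

-- the inner 'for j in range(n+1)' loop of A
def aInner (n : Int) (arr : Array (Array Int)) (i : Int) : Array (Array Int) :=
  (PySem.List.pyRange 0 (n+1)).foldl (aStep i) arr

def solution (k : Int) (n : Int) : Int :=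
  let arr0 : Array (Array Int) :=
    ((PySem.List.pyRange 0 (k+1)).map
      (fun _ => ((PySem.List.pyRange 0 (n+1)).map (fun _ => (0:Int))).toArray)).toArray
  let arr := (PySem.List.pyRange 0 (k+1)).foldl (aInner n) arr0
  PySem.List.pyGetD (PySem.List.pyGetD (arr.toList.map Array.toList) k []) n 0

-- ===== PORT B =====
-- one multiply-and-exact-divide step c = c * (n + k - r + i) // i of B's product loop
def bStep (n k r : Int) (c : Int) (i : Int) : Int := PySem.Int.floordiv (c * (n + k - r + i)) i

def solution_alt (k : Int) (n : Int) : Int :=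
  let r := min (k+1) (n-1)
  if r < 0 then 0
  else (PySem.List.pyRange 1 (r+1)).foldl (bStep n k r) 1

-- ===== PRECONDITION & SPEC =====
-- Pre_ excludes k < 0 or n < 0, where A's final read arr[k][n] indexes an empty/too-short
-- table and raises IndexError (A returns no value there).
def Pre_solution (k : Int) (n : Int) : Prop := 0 ≤ k ∧ 0 ≤ n
instance (k : Int) (n : Int) : Decidable (Pre_solution k n) := by unfold Pre_solution; infer_instance
def pvWitness_solution : Int × Int := (2, 3)

def Spec_solution (k : Int) (n : Int) (out : Int) : Prop := out = solution_alt k n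
instance (k : Int) (n : Int) (out : Int) : Decidable (Spec_solution k n out) := by unfold Spec_solution; infer_instance

-- ===== CLAIM (what is proved, stated in full; the proofs are below) =====
def Claim_equal_solution : Prop := ∀ (k : Int) (n : Int), Dom_solution k n → Pre_solution k n → Spec_solution k n (solution k n)

-- ===== LEMMAS AND PROOFS =====

-- list-level mirror of A's loop body, used only to reason about the Array port
def aStepL (i : Int) (arr : List (List Int)) (j : Int) : List (List Int) :=
  let v : Int :=
    if j = 0 then 0
    else if i = 0 then j
    else PySem.List.pyGetD (PySem.List.pyGetD arr (i-1) []) j 0 +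
         PySem.List.pyGetD (PySem.List.pyGetD arr i []) (j-1) 0
  arr.set i.toNat ((PySem.List.pyGetD arr i []).set j.toNat v)

def aInnerL (n : Int) (arr : List (List Int)) (i : Int) : List (List Int) :=
  (PySem.List.pyRange 0 (n+1)).foldl (aStepL i) arr

def ch (i j : Nat) : Int := ((i + j).choose (i + 1) : Nat)
def rowF (N i : Nat) : List Int := (List.range (N+1)).map (fun j => ch i j)
def rowP (N i t : Nat) : List Int := (List.range (N+1)).map (fun j => if j < t then ch i j else 0)
def tbl (N K m : Nat) : List (List Int) := (List.range (K+1)).map (fun r => if r < m then rowF N r else rowP N r 0)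

theorem pascal (i t : Nat) (hi : 0 < i) (ht : 0 < t) :
    ch (i-1) t + ch i (t-1) = ch i t := by
  cases i with
  | zero => omega
  | succ a =>
    cases t with
    | zero => omega
    | succ b =>
      simp only [ch, Nat.add_sub_cancel]
      have h := Nat.choose_succ_succ' (a+b+1) (a+1)
      have e1 : a + (b+1) = a+b+1 := by omega
      have e2 : (a+1) + b = a+b+1 := by omega
      have e3 : (a+1) + (b+1) = (a+b+1)+1 := by omega
      rw [e1, e2, e3, h]
      push_cast; ring

theorem ch_zero (i : Nat) : ch i 0 = 0 := by
  simp [ch, Nat.choose_eq_zero_of_lt]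

theorem ch_zero_left (t : Nat) : ch 0 t = (t : Int) := by
  simp [ch]

theorem rowP_set (N i t : Nat) (ht : t ≤ N) :
    (rowP N i t).set t (ch i t) = rowP N i (t+1) := by
  apply List.ext_getElem (by simp [rowP])
  intro j h1 h2
  simp only [rowP, List.getElem_set, List.getElem_map, List.getElem_range]
  have hj : j < N + 1 := by simpa [rowP] using h1
  split_ifs with h h' h'' <;> first | rfl | omega | (subst h; rfl)

theorem rowP_top (N i : Nat) : rowP N i (N+1) = rowF N i := by
  apply List.ext_getElem (by simp [rowP, rowF])
  intro j h1 h2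
  have hj : j < N + 1 := by simpa [rowP] using h1
  simp only [rowP, rowF, List.getElem_map, List.getElem_range]
  simp [hj]

theorem tbl_set (N K m : Nat) (hm : m ≤ K) :
    (tbl N K m).set m (rowF N m) = tbl N K (m+1) := by
  apply List.ext_getElem (by simp [tbl])
  intro j h1 h2
  simp only [tbl, List.getElem_set, List.getElem_map, List.getElem_range]
  split_ifs with h h' h'' <;> first | rfl | omega | (subst h; rfl)

theorem tbl_self (N K m : Nat) (hm : m ≤ K) :
    (tbl N K m).set m (rowP N m 0) = tbl N K m := by
  apply List.ext_getElem (by simp [tbl])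
  intro j h1 h2
  simp only [tbl, List.getElem_set, List.getElem_map, List.getElem_range]
  split_ifs with h h' <;> first | rfl | omega | (subst h; rfl)

-- value read by the partial row at index j < t
theorem rowP_getD (N i t j : Nat) (hj : j < N + 1) :
    (rowP N i t).getD j 0 = if j < t then ch i j else 0 := by
  simp [rowP, List.getD_eq_getElem?_getD, hj]

theorem rowF_getD (N i j : Nat) (hj : j < N + 1) :
    (rowF N i).getD j 0 = ch i j := by
  simp [rowF, List.getD_eq_getElem?_getD, hj]

theorem aStepL_row (N K i t : Nat) (hiK : i ≤ K) (ht : t ≤ N) (arr : List (List Int))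
    (hlen : arr.length = K + 1)
    (hprev : ∀ _ : 0 < i, arr[i-1]? = some (rowF N (i-1))) :
    aStepL (i : Int) (arr.set i (rowP N i t)) (t : Int) = arr.set i (rowP N i (t+1)) := by
  have hilen : i < arr.length := by omega
  have hgi : PySem.List.pyGetD (arr.set i (rowP N i t)) (i : Int) [] = rowP N i t := by
    rw [PySem.List.pyGetD_natCast, List.getD_eq_getElem?_getD,
        List.getElem?_set_self (by omega)]; rfl
  have hgprev : ∀ _ : 0 < i,
      PySem.List.pyGetD (arr.set i (rowP N i t)) ((i : Int) - 1) [] = rowF N (i-1) := by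
    intro hi0
    have h1 : ((i : Int) - 1) = ((i - 1 : Nat) : Int) := by omega
    rw [h1, PySem.List.pyGetD_natCast, List.getD_eq_getElem?_getD,
        List.getElem?_set_ne (by omega), hprev hi0]; rfl
  have hv :
      (if (t : Int) = 0 then 0
       else if (i : Int) = 0 then (t : Int)
       else PySem.List.pyGetD (PySem.List.pyGetD (arr.set i (rowP N i t)) ((i : Int)-1) []) (t : Int) 0 +
            PySem.List.pyGetD (rowP N i t) ((t : Int)-1) 0)
        = ch i t := by
    by_cases ht0 : t = 0
    · subst ht0; simp [ch_zero]
    · by_cases hi0 : i = 0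
      · subst hi0
        simp only [Int.natCast_eq_zero, ht0, if_false, if_true, Nat.cast_zero]
        simp [ht0, ch_zero_left]
      · have h2 : ((t : Int) - 1) = ((t - 1 : Nat) : Int) := by omega
        simp only [Int.natCast_eq_zero, ht0, hi0, if_false, h2,
                   hgprev (by omega), PySem.List.pyGetD_natCast]
        rw [rowF_getD _ _ _ (by omega), rowP_getD _ _ _ _ (by omega)]
        simp only [show t - 1 < t from by omega, if_true]
        exact pascal i t (by omega) (by omega)
  unfold aStepL
  simp only [Int.toNat_natCast, hgi]
  rw [hv, List.set_set, rowP_set _ _ _ ht]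

theorem inner_partial (N K i : Nat) (hiK : i ≤ K) (arr : List (List Int))
    (hlen : arr.length = K + 1)
    (hprev : ∀ _ : 0 < i, arr[i-1]? = some (rowF N (i-1)))
    (t : Nat) (ht : t ≤ N + 1) :
    (List.range t).foldl (fun a (j : Nat) => aStepL (i : Int) a (j : Int)) (arr.set i (rowP N i 0))
      = arr.set i (rowP N i t) := by
  induction t with
  | zero => simp
  | succ t ih =>
    rw [List.range_succ, List.foldl_append, ih (by omega)]
    simpa using aStepL_row N K i t hiK (by omega) arr hlen hprev

theorem aInnerL_tbl (N K m : Nat) (hm : m ≤ K) :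
    aInnerL (N : Int) (tbl N K m) (m : Int) = tbl N K (m+1) := by
  unfold aInnerL
  have hr : ((N : Int) + 1) = ((N+1 : Nat) : Int) := by omega
  rw [hr, PySem.List.pyRange_zero_nat, List.foldl_map]
  have hprev : ∀ _ : 0 < m, (tbl N K m)[m-1]? = some (rowF N (m-1)) := by
    intro hm0
    simp [tbl, show m-1 < K+1 from by omega, show m-1 < m from by omega]
  rw [show tbl N K m = (tbl N K m).set m (rowP N m 0) from (tbl_self N K m hm).symm]
  rw [inner_partial N K m hm (tbl N K m) (by simp [tbl]) hprev (N+1) (le_refl _)]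
  rw [rowP_top, tbl_set N K m hm]

theorem outer_tbl (N K : Nat) : ∀ m, m ≤ K+1 →
    (List.range m).foldl (fun a (i : Nat) => aInnerL (N : Int) a (i : Int)) (tbl N K 0) = tbl N K m := by
  intro m
  induction m with
  | zero => simp
  | succ m ih =>
    intro h
    rw [List.range_succ, List.foldl_append, ih (by omega)]
    simpa using aInnerL_tbl N K m (by omega)

-- entry m of the array table, as a list
theorem arr_getD_toList (arr : Array (Array Int)) (m : Nat) :
    (arr.getD m #[]).toList = (arr.toList.map Array.toList).getD m [] := by
  rw [Array.getD_eq_getD_getElem?, List.getD_eq_getElem?_getD, List.getElem?_map,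
      Array.getElem?_toList]
  cases arr[m]? <;> rfl

theorem arr_getD_entry (a : Array Int) (t : Nat) : a.getD t 0 = a.toList.getD t 0 := by
  rw [Array.getD_eq_getD_getElem?, List.getD_eq_getElem?_getD, Array.getElem?_toList]

-- the Array step is the list-level step through toList (for the nonnegative indices A's loops produce)
theorem aStep_bridge (i j : Int) (hi : 0 ≤ i) (hj : 0 ≤ j) (arr : Array (Array Int)) :
    (aStep i arr j).toList.map Array.toList
      = aStepL i (arr.toList.map Array.toList) j := by
  unfold aStep aStepL
  have hv :
      (if j = 0 then 0
       else if i = 0 then j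
       else (arr.getD (i-1).toNat #[]).getD j.toNat 0 +
            (arr.getD i.toNat #[]).getD (j-1).toNat 0)
      = (if j = 0 then 0
         else if i = 0 then j
         else PySem.List.pyGetD (PySem.List.pyGetD (arr.toList.map Array.toList) (i-1) []) j 0 +
              PySem.List.pyGetD (PySem.List.pyGetD (arr.toList.map Array.toList) i []) (j-1) 0) := by
    by_cases hj0 : j = 0
    · simp [hj0]
    · by_cases hi0 : i = 0
      · simp [hj0, hi0]
      · rw [if_neg hj0, if_neg hi0, if_neg hj0, if_neg hi0]
        rw [PySem.List.pyGetD_of_nonneg _ _ hj,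
            PySem.List.pyGetD_of_nonneg _ _ (show (0:Int) ≤ i - 1 by omega),
            PySem.List.pyGetD_of_nonneg _ _ (show (0:Int) ≤ j - 1 by omega),
            PySem.List.pyGetD_of_nonneg _ _ hi,
            ← arr_getD_toList, ← arr_getD_toList, ← arr_getD_entry, ← arr_getD_entry]
  rw [hv]
  rw [Array.toList_modify, List.modify_eq_set, List.map_set, Array.toList_setIfInBounds]
  have hrow : (arr.toList[i.toNat]?.getD default).toList
      = PySem.List.pyGetD (arr.toList.map Array.toList) i [] := by
    rw [PySem.List.pyGetD_of_nonneg _ _ hi, ← arr_getD_toList, Array.getD_eq_getD_getElem?,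
        ← Array.getElem?_toList]
    rfl
  rw [hrow]

-- the fold bridges, for any index list the loops produce (all indices nonnegative)
theorem foldl_aStep_bridge (i : Int) (hi : 0 ≤ i) (js : List Int) (hjs : ∀ j ∈ js, 0 ≤ j)
    (arr : Array (Array Int)) :
    (js.foldl (aStep i) arr).toList.map Array.toList
      = js.foldl (aStepL i) (arr.toList.map Array.toList) := by
  induction js generalizing arr with
  | nil => rfl
  | cons j js ih =>
    simp only [List.foldl_cons]
    rw [ih (fun x hx => hjs x (List.mem_cons_of_mem _ hx)),
        aStep_bridge i j hi (hjs j List.mem_cons_self) arr]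

theorem aInner_bridge (n i : Int) (hi : 0 ≤ i) (arr : Array (Array Int)) :
    (aInner n arr i).toList.map Array.toList
      = aInnerL n (arr.toList.map Array.toList) i := by
  unfold aInner aInnerL
  exact foldl_aStep_bridge i hi _
    (fun x hx => (PySem.List.mem_pyRange_one.mp hx).1) arr

theorem foldl_aInner_bridge (n : Int) (ks : List Int) (hks : ∀ x ∈ ks, 0 ≤ x)
    (arr : Array (Array Int)) :
    (ks.foldl (aInner n) arr).toList.map Array.toList
      = ks.foldl (aInnerL n) (arr.toList.map Array.toList) := by
  induction ks generalizing arr with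
  | nil => rfl
  | cons x ks ih =>
    simp only [List.foldl_cons]
    rw [ih (fun y hy => hks y (List.mem_cons_of_mem _ hy)),
        aInner_bridge n x (hks x List.mem_cons_self) arr]

theorem solution_eq_choose (N K : Nat) :
    solution (K : Int) (N : Int) = ((K + N).choose (K + 1) : Nat) := by
  unfold solution
  dsimp only
  rw [foldl_aInner_bridge (N : Int) _ (fun x hx => (PySem.List.mem_pyRange_one.mp hx).1)]
  rw [show (((PySem.List.pyRange 0 ((K : Int)+1)).map
        (fun _ => ((PySem.List.pyRange 0 ((N : Int)+1)).map (fun _ => (0:Int))).toArray)).toArray).toList.map Array.toList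
      = (PySem.List.pyRange 0 ((K : Int)+1)).map
          (fun _ => (PySem.List.pyRange 0 ((N : Int)+1)).map (fun _ => (0:Int))) from by
        simp [List.map_map]]
  have hrK : ((K : Int) + 1) = ((K+1 : Nat) : Int) := by omega
  have hrN : ((N : Int) + 1) = ((N+1 : Nat) : Int) := by omega
  rw [hrK, hrN, PySem.List.pyRange_zero_nat, PySem.List.pyRange_zero_nat, List.foldl_map]
  have h0 : (List.map (fun (k : Nat) => (k : Int)) (List.range (K+1))).map
      (fun _ => (List.map (fun (k : Nat) => (k : Int)) (List.range (N+1))).map (fun _ => (0:Int)))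
      = tbl N K 0 := by
    apply List.ext_getElem (by simp [tbl])
    intro j h1 h2
    simp [tbl, rowP, List.map_map, List.eq_replicate_iff]
  rw [h0, outer_tbl N K (K+1) (le_refl _)]
  have hrow : (tbl N K (K+1))[K]? = some (rowF N K) := by
    simp [tbl, Nat.lt_succ_self]
  rw [PySem.List.pyGetD_natCast, List.getD_eq_getElem?_getD]
  rw [show PySem.List.pyGetD (tbl N K (K+1)) ((K : Nat) : Int) [] = rowF N K from by
        rw [PySem.List.pyGetD_natCast, List.getD_eq_getElem?_getD, hrow]; rfl]
  simp [rowF, Nat.lt_succ_self, ch]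

theorem bLoop (N K R : Nat) (hR : R ≤ K + N) (t : Nat) (ht : t ≤ R) :
    (List.range t).foldl
      (fun c (j : Nat) => bStep (N : Int) (K : Int) (R : Int) c (1 + (j : Int))) 1
      = ((K + N - R + t).choose t : Nat) := by
  induction t with
  | zero => simp
  | succ t ih =>
    rw [List.range_succ, List.foldl_append, ih (by omega)]
    simp only [List.foldl_cons, List.foldl_nil]
    unfold bStep
    have hfac : ((N : Int) + K - R + (1 + t)) = ((K + N - R + t + 1 : Nat) : Int) := by omega
    have hdiv : (1 + (t : Int)) = ((t + 1 : Nat) : Int) := by omega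
    rw [hfac, hdiv, ← Nat.cast_mul, PySem.Int.floordiv_natCast]
    congr 1
    have h := Nat.succ_mul_choose_eq (K + N - R + t) t
    have : (K + N - R + t).choose t * (K + N - R + t + 1)
        = (K + N - R + t + 1).choose (t + 1) * (t + 1) := by
      rw [mul_comm]; exact h
    rw [this, Nat.mul_div_cancel _ (by omega)]
    rfl

theorem solution_alt_eq_choose (N K : Nat) :
    solution_alt (K : Int) (N : Int) = ((K + N).choose (K + 1) : Nat) := by
  unfold solution_alt
  cases N with
  | zero =>
    simp only [Nat.cast_zero, zero_sub]
    rw [if_pos (by omega)]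
    simp
  | succ N' =>
    have hr : min ((K : Int) + 1) ((N' + 1 : Nat) - 1) = ((min (K+1) N' : Nat) : Int) := by
      push_cast; omega
    rw [hr, if_neg (by omega)]
    set R := min (K+1) N' with hR
    have hRle : R ≤ K + (N' + 1) := by omega
    have hrange : ((R : Int) + 1) = (1 : Int) + ((R : Nat) : Int) := by omega
    rw [PySem.List.pyRange_one, show ((R:Int) + 1 - 1).toNat = R from by omega, List.foldl_map]
    rw [bLoop (N'+1) K R hRle R (le_refl _)]
    congr 1
    have hcan : K + (N' + 1) - R + R = K + (N' + 1) := by omega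
    rw [hcan]
    rcases le_total (K+1) N' with h | h
    · rw [show R = K + 1 from by omega]
    · rw [show R = N' from by omega]
      have := Nat.choose_symm (show N' ≤ K + (N'+1) from by omega)
      rw [show K + (N'+1) - N' = K + 1 from by omega] at this
      exact this.symm

-- ===== VERDICT (by name: the statement is the Claim_ definition above) =====
theorem solution_spec : Claim_equal_solution := by
  intro k n _ hpre
  obtain ⟨hk, hn⟩ := hpre
  unfold Spec_solution
  obtain ⟨K, rfl⟩ := Int.eq_ofNat_of_zero_le hk
  obtain ⟨N, rfl⟩ := Int.eq_ofNat_of_zero_le hn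
  rw [solution_eq_choose, solution_alt_eq_choose]
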